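-- pv_equiv track=rewrite | github.com/billybillymc/masquerade-cobol-old | pipeline/reimpl/udatecnv.py | _yyddd_to_mmdd
-- ===== SOURCE A (Python) =====
-- _DAYS_IN_MONTH = [31, 28, 31, 30, 31, 30, 31, 31, 30, 31, 30, 31]
--
-- def _is_leap(yy_2digit: int) -> bool:
--     """Replicate COBOL leap-year check: divisible by 4 (no century correction)."""
--     return (yy_2digit % 4) == 0
--
-- def _yyddd_to_mmdd(yy: int, ddd: int) -> tuple[int, int]:
--     """Convert Julian day-of-year to (month, day), applying the COBOL leap-year rule."""
--     days = list(_DAYS_IN_MONTH)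
--     days[1] = 29 if _is_leap(yy) else 28
--     remaining = ddd
--     for month_idx, month_days in enumerate(days):
--         if remaining <= month_days:
--             return month_idx + 1, remaining
--         remaining -= month_days
--     return 12, 31  # should not be reached for valid input
-- ===== SOURCE B (Python) =====
-- from bisect import bisect_left
-- from itertools import accumulate
--
-- _DAYS_IN_MONTH = [31, 28, 31, 30, 31, 30, 31, 31, 30, 31, 30, 31]
--
-- def _is_leap(yy_2digit: int) -> bool:
--     return (yy_2digit % 4) == 0
--
-- def _yyddd_to_mmdd(yy: int, ddd: int) -> tuple[int, int]:
--     days = list(_DAYS_IN_MONTH)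
--     days[1] = 29 if _is_leap(yy) else 28
--     bounds = list(accumulate(days))  # month-end day-of-year boundaries
--     i = bisect_left(bounds, ddd)
--     if i == len(bounds):
--         return 12, 31
--     return i + 1, ddd - (bounds[i - 1] if i > 0 else 0)
-- ===== Notes on version B (the rewrite author's own statement) =====
-- stated objective: idiomatic
-- what changed: Replaces the accumulator-subtraction scan over month lengths with a cumulative boundary table queried by bisect_left (binary search), subtracting the previous boundary once.
import Mathlib
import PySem

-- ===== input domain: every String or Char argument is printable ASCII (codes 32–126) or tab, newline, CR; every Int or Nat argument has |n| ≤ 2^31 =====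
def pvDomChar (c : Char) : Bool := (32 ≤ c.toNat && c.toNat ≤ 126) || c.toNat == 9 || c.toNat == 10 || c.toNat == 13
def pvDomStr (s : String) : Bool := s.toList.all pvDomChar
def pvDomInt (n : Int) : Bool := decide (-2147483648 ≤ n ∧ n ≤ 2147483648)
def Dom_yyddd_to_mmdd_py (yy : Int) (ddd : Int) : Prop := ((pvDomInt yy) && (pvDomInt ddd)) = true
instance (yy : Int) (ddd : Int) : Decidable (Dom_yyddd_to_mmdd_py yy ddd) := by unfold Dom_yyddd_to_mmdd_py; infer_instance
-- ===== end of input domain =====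

-- B replaces A's accumulator-subtraction scan over month lengths with a cumulative boundary
-- table queried by bisect_left; objective: idiomatic (same behaviour on every input).

-- ===== PORT A =====
-- A's enumerate loop: state = (remaining, month_idx); falls through to (12, 31)
def pvGoA : Int → Int → List Int → Int × Int
  | _, _, [] => (12, 31)
  | remaining, idx, d :: rest =>
    if remaining ≤ d then (idx + 1, remaining) else pvGoA (remaining - d) (idx + 1) rest

def yyddd_to_mmdd_py (yy : Int) (ddd : Int) : Int × Int :=
  -- days = list(_DAYS_IN_MONTH); days[1] = 29 if _is_leap(yy) else 28
  pvGoA ddd 0 [31, if PySem.Int.mod yy 4 == 0 then 29 else 28,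
               31, 30, 31, 30, 31, 31, 30, 31, 30, 31]

-- ===== PORT B =====
-- itertools.accumulate: running totals
def pvAccumulate : Int → List Int → List Int
  | _, [] => []
  | acc, d :: rest => (acc + d) :: pvAccumulate (acc + d) rest

-- bisect.bisect_left ported by its contract on a sorted list: the insertion index,
-- i.e. the number of leading elements < x (exact for sorted input, which bounds is)
def pvBisectLeft (xs : List Int) (x : Int) : Int :=
  ((xs.takeWhile (fun c => c < x)).length : Int)

def yyddd_to_mmdd_py_alt (yy : Int) (ddd : Int) : Int × Int :=
  let days : List Int := [31, if PySem.Int.mod yy 4 == 0 then 29 else 28,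
                          31, 30, 31, 30, 31, 31, 30, 31, 30, 31]
  let bounds := pvAccumulate 0 days
  let i := pvBisectLeft bounds ddd
  if i == (bounds.length : Int) then (12, 31)
  else (i + 1, ddd - (if i > 0 then (PySem.List.pyGet? bounds (i - 1)).getD 0 else 0))

-- ===== PRECONDITION & SPEC =====
def Spec_yyddd_to_mmdd_py (yy : Int) (ddd : Int) (out : Int × Int) : Prop := out = yyddd_to_mmdd_py_alt yy ddd
instance (yy : Int) (ddd : Int) (out : Int × Int) : Decidable (Spec_yyddd_to_mmdd_py yy ddd out) := by unfold Spec_yyddd_to_mmdd_py; infer_instance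

-- ===== CLAIM (what is proved, stated in full; the proofs are below) =====
def Claim_equal_yyddd_to_mmdd_py : Prop := ∀ (yy : Int) (ddd : Int), Dom_yyddd_to_mmdd_py yy ddd → Spec_yyddd_to_mmdd_py yy ddd (yyddd_to_mmdd_py yy ddd)

-- ===== LEMMAS AND PROOFS =====
-- Key invariant: A's subtraction loop over any month list ds, started with accumulator
-- offset s, agrees with the boundary-table lookup on the running sums pvAccumulate s ds,
-- where the bisect index is the length of the prefix of boundaries < r + s.
theorem pvGoA_table (ds : List Int) (r s idx : Int) :
    pvGoA r idx ds =
      (let C := pvAccumulate s ds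
       let i := (C.takeWhile (fun c => c < r + s)).length
       if i = ds.length then (12, 31)
       else (idx + (i : Int) + 1, (r + s) - (if 0 < i then C[i-1]?.getD 0 else s))) := by
  induction ds generalizing r s idx with
  | nil => simp [pvGoA, pvAccumulate]
  | cons d rest ih =>
    simp only [pvGoA, pvAccumulate, List.takeWhile]
    by_cases h : r ≤ d
    · have hc : ¬ (s + d < r + s) := by omega
      simp only [if_pos h, hc, decide_false, List.length_cons]
      simp [show r + s - s = r by ring]
    · have hc : (s + d < r + s) := by omega
      rw [ih (r - d) (s + d) (idx + 1)]
      simp only [if_neg h, hc, decide_true, List.length_cons]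
      have hrs : r - d + (s + d) = r + s := by ring
      rw [hrs]
      set L := ((pvAccumulate (s + d) rest).takeWhile (fun c => c < r + s)) with hL
      by_cases he : L.length = rest.length
      · simp [he]
      · simp only [if_neg he, show ¬ (L.length + 1 = rest.length + 1) by omega]
        cases hn : L.length with
        | zero => simp
        | succ k =>
          simp only [Nat.succ_sub_one, List.getElem?_cons_succ, Nat.succ_pos, if_pos,
            Prod.ext_iff]
          refine ⟨by push_cast; ring, ?_⟩
          simp

theorem pvAccumulate_length (s : Int) (xs : List Int) :
    (pvAccumulate s xs).length = xs.length := by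
  induction xs generalizing s with
  | nil => rfl
  | cons d rest ih => simp [pvAccumulate, ih]

theorem pv_main (yy ddd : Int) : yyddd_to_mmdd_py yy ddd = yyddd_to_mmdd_py_alt yy ddd := by
  unfold yyddd_to_mmdd_py yyddd_to_mmdd_py_alt pvBisectLeft
  rw [pvGoA_table _ ddd 0 0]
  simp only [add_zero]
  set ds : List Int := [31, if PySem.Int.mod yy 4 == 0 then 29 else 28,
                        31, 30, 31, 30, 31, 31, 30, 31, 30, 31] with hds
  set C := pvAccumulate 0 ds with hC
  set n := (C.takeWhile (fun c => c < ddd)).length with hn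
  have hlen : C.length = ds.length := pvAccumulate_length 0 ds
  by_cases h12 : n = ds.length
  · simp [h12, hlen]
  · have hb : ((n : Int) == (C.length : Int)) = false := by
      simp [hlen]; omega
    simp only [if_neg h12, hb, Bool.false_eq_true, if_false]
    by_cases hpos : 0 < n
    · have h1 : ((n : Int) - 1) = ((n - 1 : Nat) : Int) := by omega
      have h2 : ((n : Int) > 0) := by omega
      rw [if_pos hpos, if_pos h2, h1, PySem.List.pyGet?_natCast]
      simp
    · have h2 : ¬ ((n : Int) > 0) := by omega
      rw [if_neg hpos, if_neg h2]
      simp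

-- ===== VERDICT (by name: the statement is the Claim_ definition above) =====
theorem yyddd_to_mmdd_py_spec : Claim_equal_yyddd_to_mmdd_py := by
  intro yy ddd _
  unfold Spec_yyddd_to_mmdd_py
  exact pv_main yy ddd
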